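-- pv_equiv track=rewrite | github.com/jl-wynen/scicat_widget | src/scicat_widget/_upload.py | _convert_owners
-- ===== SOURCE A (Python) =====
-- def _convert_owners(owners: list[dict[str, str]] | None) -> dict[str, str]:
--     if not owners:
--         return {}
--
--     names = []
--     emails = []
--     orcids = []
--     for owner in owners:
--         names.append(owner.get("name", ""))
--         emails.append(owner.get("email", ""))
--         orcids.append(owner.get("orcid", ""))
--
--     name = ";".join(names)
--     email = ";".join(emails)
--     orcid = ";".join(orcids)
--     return {"owner": name, "owner_email": email, "orcid_of_owner": orcid}
-- ===== SOURCE B (Python) =====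
-- _FIELDS = [("owner", "name"), ("owner_email", "email"), ("orcid_of_owner", "orcid")]
--
--
-- def _convert_owners(owners):
--     if not owners:
--         return {}
--     return {out: ";".join(o.get(src, "") for o in owners) for out, src in _FIELDS}
-- ===== Notes on version B (the rewrite author's own statement) =====
-- stated objective: simpler
-- what changed: Replaces the single loop accumulating three parallel lists with a (output_key, source_key) field table and a dict comprehension that joins each field by its own scan over owners.
import Mathlib
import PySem

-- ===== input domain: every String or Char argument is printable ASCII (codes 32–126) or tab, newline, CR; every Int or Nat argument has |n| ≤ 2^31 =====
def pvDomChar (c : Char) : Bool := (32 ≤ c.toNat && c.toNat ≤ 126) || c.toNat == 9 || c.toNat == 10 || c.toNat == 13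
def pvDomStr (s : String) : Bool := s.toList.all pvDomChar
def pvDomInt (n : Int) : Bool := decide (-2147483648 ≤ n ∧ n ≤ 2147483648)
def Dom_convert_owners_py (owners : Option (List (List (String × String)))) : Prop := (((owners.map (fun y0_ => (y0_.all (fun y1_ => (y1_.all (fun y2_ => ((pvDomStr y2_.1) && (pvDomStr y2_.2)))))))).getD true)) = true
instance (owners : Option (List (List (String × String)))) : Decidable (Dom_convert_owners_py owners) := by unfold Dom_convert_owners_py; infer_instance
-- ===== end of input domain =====

-- ===== PORT A =====
-- B replaces A's single loop collecting three parallel lists with a field table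
-- mapped to per-field joins (objective: simpler).
def convert_owners_py (owners : Option (List (List (String × String)))) : List (String × String) :=
  match owners with
  | none => []
  | some os =>
    if os = [] then []
    else
      let acc := os.foldl
        (fun (acc : List String × List String × List String) owner =>
          (acc.1 ++ [(PySem.Dict.mk owner).getD "name" ""],
           acc.2.1 ++ [(PySem.Dict.mk owner).getD "email" ""],
           acc.2.2 ++ [(PySem.Dict.mk owner).getD "orcid" ""]))
        ([], [], [])
      let name := PySem.Str.join ";" acc.1
      let email := PySem.Str.join ";" acc.2.1
      let orcid := PySem.Str.join ";" acc.2.2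
      [("owner", name), ("owner_email", email), ("orcid_of_owner", orcid)]

-- ===== PORT B =====
def convertOwnersFields : List (String × String) :=
  [("owner", "name"), ("owner_email", "email"), ("orcid_of_owner", "orcid")]

def convert_owners_py_alt (owners : Option (List (List (String × String)))) : List (String × String) :=
  match owners with
  | none => []
  | some os =>
    if os = [] then []
    else
      convertOwnersFields.map
        (fun p => (p.1, PySem.Str.join ";" (os.map (fun o => (PySem.Dict.mk o).getD p.2 ""))))

-- ===== PRECONDITION & SPEC =====
def Spec_convert_owners_py (owners : Option (List (List (String × String)))) (out : List (String × String)) : Prop := out = convert_owners_py_alt owners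
instance (owners : Option (List (List (String × String)))) (out : List (String × String)) : Decidable (Spec_convert_owners_py owners out) := by unfold Spec_convert_owners_py; infer_instance

-- ===== CLAIM (what is proved, stated in full; the proofs are below) =====
def Claim_equal_convert_owners_py : Prop := ∀ (owners : Option (List (List (String × String)))), Dom_convert_owners_py owners → Spec_convert_owners_py owners (convert_owners_py owners)

-- ===== LEMMAS AND PROOFS =====
theorem convert_owners_foldl_eq (os : List (List (String × String)))
    (a b c : List String) :
    os.foldl
      (fun (acc : List String × List String × List String) owner =>
        (acc.1 ++ [(PySem.Dict.mk owner).getD "name" ""],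
         acc.2.1 ++ [(PySem.Dict.mk owner).getD "email" ""],
         acc.2.2 ++ [(PySem.Dict.mk owner).getD "orcid" ""]))
      (a, b, c)
    = (a ++ os.map (fun o => (PySem.Dict.mk o).getD "name" ""),
       b ++ os.map (fun o => (PySem.Dict.mk o).getD "email" ""),
       c ++ os.map (fun o => (PySem.Dict.mk o).getD "orcid" "")) := by
  induction os generalizing a b c with
  | nil => simp
  | cons o os ih => simp [List.foldl_cons, ih]

-- ===== VERDICT (by name: the statement is the Claim_ definition above) =====
theorem convert_owners_py_spec : Claim_equal_convert_owners_py := by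
  intro owners _
  unfold Spec_convert_owners_py convert_owners_py convert_owners_py_alt
  match owners with
  | none => rfl
  | some os =>
    by_cases h : os = [] <;>
      simp [h, convert_owners_foldl_eq, convertOwnersFields]
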